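-- pv_equiv track=rewrite | github.com/dpk/htmldiff | htmldiff.py | path_difference
-- ===== SOURCE A (Python) =====
-- def path_difference(a, b):
--  switch = False
--  if len(a) > len(b):
--    a, b = b, a
--    switch = True
--
--  sames = []
--  lasti = -1
--  for i, x in enumerate(a):
--    if a[i] == b[i]:
--      sames.append(x)
--      lasti = i
--    else:
--      break
--
--  if not switch:
--    return (sames, a[lasti+1:], b[lasti+1:])
--  else:
--    return (sames, b[lasti+1:], a[lasti+1:])
-- ===== SOURCE B (Python) =====
-- def path_difference(a, b):
--     # Binary search for the largest m with a[:m] == b[:m]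
--     # (prefix equality is monotone in m, so bisection is valid).
--     lo, hi = 0, min(len(a), len(b))
--     while lo < hi:
--         mid = (lo + hi + 1) // 2
--         if a[:mid] == b[:mid]:
--             lo = mid
--         else:
--             hi = mid - 1
--     return (a[:lo], a[lo:], b[lo:])
-- ===== Notes on version B (the rewrite author's own statement) =====
-- stated objective: alternative
-- what changed: Replaces A's element-by-element scan with swap/switch flag and appended-prefix accumulator by a binary search (bisection) for the largest m with a[:m]==b[:m], exploiting monotonicity of prefix equality, then three slices.
import Mathlib
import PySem

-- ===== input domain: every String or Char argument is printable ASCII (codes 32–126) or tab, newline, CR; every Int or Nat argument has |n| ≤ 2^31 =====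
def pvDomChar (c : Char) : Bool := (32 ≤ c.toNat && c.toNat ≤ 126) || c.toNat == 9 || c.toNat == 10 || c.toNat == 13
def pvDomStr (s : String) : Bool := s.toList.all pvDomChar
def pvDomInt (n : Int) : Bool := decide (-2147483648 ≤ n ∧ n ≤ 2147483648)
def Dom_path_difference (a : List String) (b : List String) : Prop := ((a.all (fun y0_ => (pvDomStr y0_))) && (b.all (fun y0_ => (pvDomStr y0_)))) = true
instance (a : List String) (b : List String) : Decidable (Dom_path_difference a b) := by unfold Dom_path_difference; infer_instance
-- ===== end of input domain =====

-- B replaces A's element scan with swap/flag by a binary search for the largest m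
-- with a[:m] == b[:m] (prefix equality is monotone in m), then slices (objective: alternative).

-- ===== PORT A =====
-- the 'for i, x in enumerate(a): if a[i] == b[i]: sames.append(x); lasti = i else: break' loop;
-- state = (sames, lasti).  a[i] / b[i] via pyGet?; b[i] is always in range (len a ≤ len b after
-- the swap), so the comparison of the two options is exactly Python's a[i] == b[i].
def pdLoopA (aF bF : List String) : List (Int × String) → List String → Int → List String × Int
  | [], sames, lasti => (sames, lasti)
  | (i, x) :: rest, sames, lasti =>
    if PySem.List.pyGet? aF i = PySem.List.pyGet? bF i then
      pdLoopA aF bF rest (sames ++ [x]) i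
    else
      (sames, lasti)

def path_difference (a : List String) (b : List String) : List String × List String × List String :=
  -- switch = False; if len(a) > len(b): a, b = b, a; switch = True
  let switch : Bool := decide (a.length > b.length)
  let p : List String × List String := if a.length > b.length then (b, a) else (a, b)
  -- sames = []; lasti = -1; the for loop
  let r := pdLoopA p.1 p.2 (PySem.List.enumerate p.1 0) [] (-1)
  if !switch then
    (r.1, PySem.List.slice p.1 (some (r.2 + 1)) none, PySem.List.slice p.2 (some (r.2 + 1)) none)
  else
    (r.1, PySem.List.slice p.2 (some (r.2 + 1)) none, PySem.List.slice p.1 (some (r.2 + 1)) none)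

-- ===== PORT B =====
-- the 'while lo < hi: mid = (lo+hi+1)//2; if a[:mid]==b[:mid]: lo = mid else: hi = mid-1' loop;
-- terminates because hi - lo strictly decreases (lo < mid ≤ hi).
def pdBisect (a b : List String) (lo hi : Int) : Int :=
  if h : lo < hi then
    let mid := PySem.Int.floordiv (lo + hi + 1) 2
    if PySem.List.slice a none (some mid) = PySem.List.slice b none (some mid) then
      pdBisect a b mid hi
    else
      pdBisect a b lo (mid - 1)
  else
    lo
termination_by (hi - lo).toNat
decreasing_by
  · have h2 := PySem.Int.floordiv_two_mid_bounds (lo := lo + 1) (hi := hi) (by omega)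
    rw [show lo + 1 + hi = lo + hi + 1 by ring] at h2
    omega
  · have h2 := PySem.Int.floordiv_two_mid_bounds (lo := lo + 1) (hi := hi) (by omega)
    rw [show lo + 1 + hi = lo + hi + 1 by ring] at h2
    omega

def path_difference_alt (a : List String) (b : List String) : List String × List String × List String :=
  -- lo, hi = 0, min(len(a), len(b)); the while loop; return (a[:lo], a[lo:], b[lo:])
  let lo := pdBisect a b 0 (min (a.length : Int) (b.length : Int))
  (PySem.List.slice a none (some lo),
   PySem.List.slice a (some lo) none,
   PySem.List.slice b (some lo) none)

-- ===== PRECONDITION & SPEC =====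
def Spec_path_difference (a : List String) (b : List String) (out : List String × List String × List String) : Prop := out = path_difference_alt a b
instance (a : List String) (b : List String) (out : List String × List String × List String) : Decidable (Spec_path_difference a b out) := by unfold Spec_path_difference; infer_instance

-- ===== CLAIM =====
def Claim_equal_path_difference : Prop := ∀ (a : List String) (b : List String), Dom_path_difference a b → Spec_path_difference a b (path_difference a b)

-- ===== LEMMAS AND PROOFS =====
-- length of the common prefix (proof-side characterisation, used by both directions)
def prefLen (a b : List String) : Nat :=
  match a, b with
  | x :: xs, y :: ys => if x = y then prefLen xs ys + 1 else 0
  | _, _ => 0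

theorem prefLen_comm (a b : List String) : prefLen a b = prefLen b a := by
  induction a generalizing b with
  | nil => cases b <;> simp [prefLen]
  | cons x xs ih =>
    cases b with
    | nil => simp [prefLen]
    | cons y ys =>
      simp only [prefLen]
      by_cases h : x = y
      · simp [h, ih]
      · rw [if_neg h, if_neg (Ne.symm h)]

theorem prefLen_le_left (a b : List String) : prefLen a b ≤ a.length := by
  induction a generalizing b with
  | nil => simp [prefLen]
  | cons x xs ih =>
    cases b with
    | nil => simp [prefLen]
    | cons y ys =>
      simp only [prefLen]
      by_cases h : x = y
      · simp [h]; exact ih ys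
      · simp [h]

theorem prefLen_le_right (a b : List String) : prefLen a b ≤ b.length := by
  rw [prefLen_comm]; exact prefLen_le_left b a

theorem take_prefLen (a b : List String) : a.take (prefLen a b) = b.take (prefLen a b) := by
  induction a generalizing b with
  | nil => cases b <;> simp [prefLen]
  | cons x xs ih =>
    cases b with
    | nil => simp [prefLen]
    | cons y ys =>
      simp only [prefLen]
      by_cases h : x = y
      · simp [h, ih]
      · simp [h]

-- prefix equality is monotone: m ≤ prefLen → a.take m = b.take m
theorem take_eq_of_le_prefLen (a b : List String) (m : Nat) (hm : m ≤ prefLen a b) :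
    a.take m = b.take m := by
  have h1 : a.take m = (a.take (prefLen a b)).take m := by
    rw [List.take_take, Nat.min_eq_left hm]
  have h2 : b.take m = (b.take (prefLen a b)).take m := by
    rw [List.take_take, Nat.min_eq_left hm]
  rw [h1, h2, take_prefLen]

-- and prefixes strictly longer than prefLen (within range) differ
theorem take_ne_of_prefLen_lt (a b : List String) (m : Nat) (hm : prefLen a b < m)
    (ha : m ≤ a.length) (hb : m ≤ b.length) : a.take m ≠ b.take m := by
  induction a generalizing b m with
  | nil => simp at ha; omega
  | cons x xs ih =>
    cases b with
    | nil => simp at hb; omega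
    | cons y ys =>
      by_cases h : x = y
      · simp only [prefLen, if_pos h] at hm
        cases m with
        | zero => omega
        | succ k =>
          simp only [List.take_succ_cons, h]
          intro heq
          apply ih ys k (by omega) (by simpa using ha) (by simpa using hb)
          exact (List.cons_inj_right _).mp heq
      · cases m with
        | zero => omega
        | succ k =>
          simp only [List.take_succ_cons]
          intro heq
          exact h ((List.cons_eq_cons.mp heq).1)

-- the bisection loop computes prefLen whenever it brackets it
theorem pdBisect_eq (a b : List String) (lo hi : Int)
    (h0 : 0 ≤ lo) (hlo : lo ≤ (prefLen a b : Int)) (hhi : (prefLen a b : Int) ≤ hi)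
    (hhib : hi ≤ min (a.length : Int) (b.length : Int)) :
    pdBisect a b lo hi = (prefLen a b : Int) := by
  by_cases h : lo < hi
  · have hmid := PySem.Int.floordiv_two_mid_bounds (lo := lo + 1) (hi := hi) (by omega)
    rw [show lo + 1 + hi = lo + hi + 1 by ring] at hmid
    have hmid0 : 0 ≤ PySem.Int.floordiv (lo + hi + 1) 2 := by omega
    have hsl : ∀ xs : List String,
        PySem.List.slice xs none (some (PySem.Int.floordiv (lo + hi + 1) 2)) =
          xs.take (PySem.Int.floordiv (lo + hi + 1) 2).toNat := by
      intro xs; exact PySem.List.slice_to xs hmid0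
    rw [pdBisect]
    simp only [dif_pos h, hsl]
    set mid := PySem.Int.floordiv (lo + hi + 1) 2 with hm
    by_cases hc : a.take mid.toNat = b.take mid.toNat
    · rw [if_pos hc]
      have hmle : mid ≤ (prefLen a b : Int) := by
        by_contra hgt
        exact take_ne_of_prefLen_lt a b mid.toNat (by omega) (by omega) (by omega) hc
      exact pdBisect_eq a b _ hi (by omega) hmle hhi hhib
    · rw [if_neg hc]
      have hmgt : (prefLen a b : Int) < mid := by
        by_contra hle
        exact hc (take_eq_of_le_prefLen a b mid.toNat (by omega))
      exact pdBisect_eq a b lo _ h0 hlo (by omega) (by omega)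
  · rw [pdBisect, dif_neg h]; omega
termination_by (hi - lo).toNat
decreasing_by
  · have h2 := PySem.Int.floordiv_two_mid_bounds (lo := lo + 1) (hi := hi) (by omega)
    rw [show lo + 1 + hi = lo + hi + 1 by ring] at h2
    omega
  · have h2 := PySem.Int.floordiv_two_mid_bounds (lo := lo + 1) (hi := hi) (by omega)
    rw [show lo + 1 + hi = lo + hi + 1 by ring] at h2
    omega

theorem pdBisect_top (a b : List String) :
    pdBisect a b 0 (min (a.length : Int) (b.length : Int)) = (prefLen a b : Int) := by
  refine pdBisect_eq a b _ _ le_rfl (by omega) ?_ le_rfl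
  have h1 := prefLen_le_left a b
  have h2 := prefLen_le_right a b
  omega

theorem path_difference_alt_eq (a b : List String) :
    path_difference_alt a b =
      (a.take (prefLen a b), a.drop (prefLen a b), b.drop (prefLen a b)) := by
  simp only [path_difference_alt, pdBisect_top, PySem.List.slice_to_natCast,
    PySem.List.slice_from_natCast]

-- A's loop: characterisation in terms of prefLen
theorem pdLoopA_spec (u v : List String) :
    ∀ (w : List String) (k : Nat) (sames : List String), u.drop k = w →
    pdLoopA u v (PySem.List.enumerate w (k : Int)) sames ((k : Int) - 1) =
      (sames ++ w.take (prefLen w (v.drop k)), (k : Int) + prefLen w (v.drop k) - 1) := by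
  intro w
  induction w with
  | nil => intro k sames _; simp [PySem.List.enumerate_nil, pdLoopA, prefLen]
  | cons x rest ih =>
    intro k sames hw
    have hu : PySem.List.pyGet? u (k : Int) = some x := by
      rw [PySem.List.pyGet?_natCast]
      have h0 : u[k]? = (u.drop k)[0]? := by simp [List.getElem?_drop]
      rw [h0, hw]; rfl
    have hdropsucc : u.drop (k + 1) = rest := by
      have h1 : u.drop (k + 1) = (u.drop k).drop 1 := by rw [List.drop_drop]
      rw [h1, hw]; rfl
    have hv : PySem.List.pyGet? v (k : Int) = (v.drop k)[0]? := by
      rw [PySem.List.pyGet?_natCast]; simp [List.getElem?_drop]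
    rw [PySem.List.enumerate_cons]
    cases hvd : v.drop k with
    | nil =>
      have hcond : ¬ (PySem.List.pyGet? u (k : Int) = PySem.List.pyGet? v (k : Int)) := by
        rw [hu, hv, hvd]; simp
      simp only [pdLoopA, if_neg hcond]
      simp [prefLen]
    | cons y ys =>
      have hvy : PySem.List.pyGet? v (k : Int) = some y := by rw [hv, hvd]; rfl
      have hvsucc : v.drop (k + 1) = ys := by
        have h1 : v.drop (k + 1) = (v.drop k).drop 1 := by rw [List.drop_drop]
        rw [h1, hvd]; rfl
      by_cases hxy : x = y
      · subst hxy
        have hcond : PySem.List.pyGet? u (k : Int) = PySem.List.pyGet? v (k : Int) := by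
          rw [hu, hvy]
        have hih := ih (k + 1) (sames ++ [x]) hdropsucc
        rw [hvsucc] at hih
        push_cast at hih
        have hk0 : ((k : Int) + 1 - 1) = (k : Int) := by ring
        rw [hk0] at hih
        simp only [pdLoopA, if_pos hcond, hih]
        simp only [prefLen, if_true, List.take_succ_cons, Prod.mk.injEq]
        refine ⟨by simp, by push_cast; ring⟩
      · have hcond : ¬ (PySem.List.pyGet? u (k : Int) = PySem.List.pyGet? v (k : Int)) := by
          rw [hu, hvy]; simp [hxy]
        simp only [pdLoopA, if_neg hcond]
        simp [prefLen, hxy]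

theorem pdLoopA_zero (u v : List String) :
    pdLoopA u v (PySem.List.enumerate u 0) [] (-1) =
      (u.take (prefLen u v), (prefLen u v : Int) - 1) := by
  have h := pdLoopA_spec u v u 0 [] (by simp)
  simpa using h

-- ===== VERDICT =====
theorem path_difference_spec : Claim_equal_path_difference := by
  intro a b _
  unfold Spec_path_difference path_difference
  rw [path_difference_alt_eq]
  by_cases h : a.length > b.length
  · rw [if_pos h]
    simp only [h, decide_true, Bool.not_true, Bool.false_eq_true, if_false, pdLoopA_zero]
    have harith : (prefLen b a : Int) - 1 + 1 = ((prefLen b a : Nat) : Int) := by ring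
    rw [harith, PySem.List.slice_from_natCast, PySem.List.slice_from_natCast,
      prefLen_comm b a, ← take_prefLen a b]
  · rw [if_neg h]
    simp only [h, decide_false, Bool.not_false, if_true, pdLoopA_zero]
    have harith : (prefLen a b : Int) - 1 + 1 = ((prefLen a b : Nat) : Int) := by ring
    rw [harith, PySem.List.slice_from_natCast, PySem.List.slice_from_natCast]
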